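-- pv_equiv track=rewrite | github.com/zby/DayDreamingDayDreaming | scripts/filter_active_evaluation_scores.py | group_metric_columns
-- ===== SOURCE A (Python) =====
-- from typing import Sequence
--
-- def group_metric_columns(fieldnames: Sequence[str], active_templates: set[str]) -> dict[str, list[str]]:
--     grouped: dict[str, list[str]] = {template: [] for template in active_templates}
--     for name in fieldnames:
--         if "__" not in name:
--             continue
--         template_id = name.split("__", 1)[0]
--         if template_id in grouped:
--             grouped[template_id].append(name)
--     return grouped
-- ===== SOURCE B (Python) =====
-- from typing import Sequence
--
-- def group_metric_columns(fieldnames: Sequence[str], active_templates: set[str]) -> dict[str, list[str]]: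
--     return {
--         template: [name for name in fieldnames
--                    if "__" in name and name.split("__", 1)[0] == template]
--         for template in active_templates
--     }
-- ===== Notes on version B (the rewrite author's own statement) =====
-- stated objective: simpler
-- what changed: Replaces A's initialise-then-mutate single indexing pass with a dict comprehension that builds each group directly by scanning fieldnames per template.
import Mathlib
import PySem

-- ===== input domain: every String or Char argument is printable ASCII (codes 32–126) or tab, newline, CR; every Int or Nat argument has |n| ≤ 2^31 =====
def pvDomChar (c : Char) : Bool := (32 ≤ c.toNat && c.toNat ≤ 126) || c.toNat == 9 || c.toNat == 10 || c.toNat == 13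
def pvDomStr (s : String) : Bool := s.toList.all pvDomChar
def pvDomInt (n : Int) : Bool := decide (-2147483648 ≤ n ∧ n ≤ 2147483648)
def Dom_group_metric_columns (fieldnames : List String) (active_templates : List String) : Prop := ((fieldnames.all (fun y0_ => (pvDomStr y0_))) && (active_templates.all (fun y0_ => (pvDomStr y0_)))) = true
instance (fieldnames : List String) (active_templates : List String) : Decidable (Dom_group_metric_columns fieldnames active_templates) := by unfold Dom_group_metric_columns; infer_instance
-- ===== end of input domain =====

-- B replaces A's initialise-then-mutate single pass over fieldnames with a dict
-- comprehension building each template's group directly (simpler; same result).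

-- ===== PORT A =====
-- name.split("__", 1)[0]: splitMax? is `some` for sep ≠ "" and the result is
-- nonempty, so `getD []` / `headD ""` never supply their defaults (exact).
def pvTemplateId (name : String) : String :=
  ((PySem.Str.splitMax? name "__" 1).getD []).headD ""

-- the body of A's `for name in fieldnames` loop
def pvStepA (d : PySem.Dict String (List String)) (name : String) : PySem.Dict String (List String) :=
  if !(PySem.Str.isIn "__" name) then d
  else if d.contains (pvTemplateId name) then
    d.insert (pvTemplateId name) (d.getD (pvTemplateId name) [] ++ [name])  -- grouped[template_id].append(name)
  else d

def group_metric_columns (fieldnames : List String) (active_templates : List String) : List (String × List String) :=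
  let grouped : PySem.Dict String (List String) :=
    active_templates.foldl (fun d template => d.insert template []) PySem.Dict.empty
  (fieldnames.foldl pvStepA grouped).items

-- ===== PORT B =====
def group_metric_columns_alt (fieldnames : List String) (active_templates : List String) : List (String × List String) :=
  (active_templates.foldl (fun d template =>
      d.insert template (fieldnames.filter (fun name =>
        PySem.Str.isIn "__" name && (pvTemplateId name == template))))
    (PySem.Dict.empty : PySem.Dict String (List String))).items

-- ===== PRECONDITION & SPEC =====
def Spec_group_metric_columns (fieldnames : List String) (active_templates : List String) (out : List (String × List String)) : Prop := out = group_metric_columns_alt fieldnames active_templates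
instance (fieldnames : List String) (active_templates : List String) (out : List (String × List String)) : Decidable (Spec_group_metric_columns fieldnames active_templates out) := by unfold Spec_group_metric_columns; infer_instance

-- ===== CLAIM (what is proved, stated in full; the proofs are below) =====
def Claim_equal_group_metric_columns : Prop := ∀ (fieldnames : List String) (active_templates : List String), Dom_group_metric_columns fieldnames active_templates → Spec_group_metric_columns fieldnames active_templates (group_metric_columns fieldnames active_templates)

-- ===== LEMMAS AND PROOFS =====

-- An insert loop whose value depends only on the key, started from a dict of
-- shape S.map (k, F k), keeps that shape on the updated key set.
theorem pv_foldl_insert_items (F : String → List String) (ats : List String) :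
    ∀ (S : List String) (d : PySem.Dict String (List String)), S.Nodup →
      d.items = S.map (fun k => (k, F k)) →
      (ats.foldl (fun d t => d.insert t (F t)) d).items
        = (PySem.Set.update S ats).map (fun k => (k, F k)) := by
  induction ats with
  | nil => intro S d _ h; simpa [PySem.Set.update] using h
  | cons t ts ih =>
    intro S d hS h
    have hkeys : d.keys = S := by
      simp [PySem.Dict.keys, h, Function.comp_def]
    by_cases ht : t ∈ S
    · have hc : d.contains t = true := by
        simp [PySem.Dict.contains_eq_decide_mem_keys, hkeys, ht]
      have hitems : (d.insert t (F t)).items = S.map (fun k => (k, F k)) := by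
        rw [PySem.Dict.items_insert, hc, if_pos rfl, h, List.map_map]
        refine List.map_congr_left ?_
        intro k _
        by_cases hk : k = t <;> simp [hk]
      have hadd : PySem.Set.add S t = S := PySem.Set.add_of_mem ht
      simpa [List.foldl_cons, PySem.Set.update_cons, hadd] using
        ih S (d.insert t (F t)) hS hitems
    · have hc : d.contains t = false := by
        simp [PySem.Dict.contains_eq_decide_mem_keys, hkeys, ht]
      have hitems : (d.insert t (F t)).items = (S ++ [t]).map (fun k => (k, F k)) := by
        rw [PySem.Dict.items_insert, hc]; simp [h]
      have hadd : PySem.Set.add S t = S ++ [t] := PySem.Set.add_of_not_mem ht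
      have hnd : (S ++ [t]).Nodup :=
        hS.append (List.nodup_singleton t) (by simpa [List.disjoint_singleton] using ht)
      simpa [List.foldl_cons, PySem.Set.update_cons, hadd] using
        ih (S ++ [t]) (d.insert t (F t)) hnd hitems

-- A's pass over fieldnames appends to each existing key exactly the names
-- whose template prefix is that key.
theorem pv_fieldnames_loop (fns : List String) :
    ∀ (S : List String) (v : String → List String) (d : PySem.Dict String (List String)),
      S.Nodup → d.items = S.map (fun k => (k, v k)) →
      (fns.foldl pvStepA d).items
        = S.map (fun k => (k, v k ++ fns.filter (fun name =>
            PySem.Str.isIn "__" name && (pvTemplateId name == k)))) := by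
  induction fns with
  | nil => intro S v d _ h; simpa using h
  | cons n ns ih =>
    intro S v d hS h
    have hkeys : d.keys = S := by
      simp [PySem.Dict.keys, h, Function.comp_def]
    rw [List.foldl_cons]
    by_cases hin : PySem.Str.isIn "__" n = true
    · have hinC : PySem.Chars.isIn ['_', '_'] n.toList = true := by simpa using hin
      by_cases ht : pvTemplateId n ∈ S
      · have hc : d.contains (pvTemplateId n) = true := by
          simp [PySem.Dict.contains_eq_decide_mem_keys, hkeys, ht]
        have hmem : (pvTemplateId n, v (pvTemplateId n)) ∈ d.items := by
          rw [h]; exact List.mem_map.mpr ⟨pvTemplateId n, ht, rfl⟩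
        have hnd : d.keys.Nodup := by rw [hkeys]; exact hS
        have hgetD : d.getD (pvTemplateId n) [] = v (pvTemplateId n) :=
          PySem.Dict.getD_of_mem_items d hmem hnd []
        have hstep : pvStepA d n
            = d.insert (pvTemplateId n) (v (pvTemplateId n) ++ [n]) := by
          rw [pvStepA, hgetD]; simp [hinC, hc]
        have hitems : (d.insert (pvTemplateId n) (v (pvTemplateId n) ++ [n])).items
            = S.map (fun k => (k, (if k = pvTemplateId n then v (pvTemplateId n) ++ [n] else v k))) := by
          rw [PySem.Dict.items_insert, hc, if_pos rfl, h, List.map_map]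
          refine List.map_congr_left ?_
          intro k _
          by_cases hk : k = pvTemplateId n <;> simp [hk]
        rw [hstep, ih S _ _ hS hitems]
        refine List.map_congr_left ?_
        intro k _
        by_cases hk : k = pvTemplateId n
        · subst hk
          simp [hinC]
        · have hne : (pvTemplateId n == k) = false :=
            beq_eq_false_iff_ne.mpr (fun hkk => hk hkk.symm)
          simp [hne, hk]
      · have hc : d.contains (pvTemplateId n) = false := by
          simp [PySem.Dict.contains_eq_decide_mem_keys, hkeys, ht]
        have hstep : pvStepA d n = d := by
          rw [pvStepA]; simp [hinC, hc]
        rw [hstep, ih S v d hS h]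
        refine List.map_congr_left ?_
        intro k hkS
        have hne : (pvTemplateId n == k) = false :=
          beq_eq_false_iff_ne.mpr (fun hkk => ht (hkk ▸ hkS))
        simp [hne]
    · have hin' : PySem.Str.isIn "__" n = false := by
        cases hx : PySem.Str.isIn "__" n
        · rfl
        · exact absurd hx hin
      have hinC : PySem.Chars.isIn ['_', '_'] n.toList = false := by
        simpa using hin'
      have hstep : pvStepA d n = d := by
        rw [pvStepA]; simp [hinC]
      rw [hstep, ih S v d hS h]
      refine List.map_congr_left ?_
      intro k _
      simp [hinC]

-- ===== VERDICT (by name: the statement is the Claim_ definition above) =====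
theorem group_metric_columns_spec : Claim_equal_group_metric_columns := by
  intro fns ats _
  unfold Spec_group_metric_columns group_metric_columns group_metric_columns_alt
  have hinit := pv_foldl_insert_items (fun _ => ([] : List String)) ats [] PySem.Dict.empty
    List.nodup_nil (by simp [PySem.Dict.empty])
  have hB := pv_foldl_insert_items
    (fun k => fns.filter (fun name => PySem.Str.isIn "__" name && (pvTemplateId name == k)))
    ats [] PySem.Dict.empty List.nodup_nil (by simp [PySem.Dict.empty])
  have hndS : (PySem.Set.update ([] : List String) ats).Nodup := by
    rw [PySem.Set.update_nil_left]; exact PySem.Set.nodup_ofList (α := String) (xs := ats)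
  have hA := pv_fieldnames_loop fns (PySem.Set.update ([] : List String) ats)
    (fun _ => ([] : List String)) _ hndS hinit
  simp only [hA, hB, List.nil_append]
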